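-- pv_equiv track=rewrite | github.com/Srimant1323/Bioinformatics-Basic-Practice | section1_dna_basics.py | find_start_stop
-- ===== SOURCE A (Python) =====
-- def find_start_stop(seq):
--     starts = []
--     stops = []
--     for i in range(len(seq)-2):
--         codon = seq[i:i+3]
--         if codon == "ATG":
--             starts.append(i)
--         if codon in ["TAA", "TAG", "TGA"]:
--             stops.append(i)
--     return starts, stops
-- ===== SOURCE B (Python) =====
-- def find_start_stop(seq):
--     starts = []
--     stops = []
--     p2 = p1 = None
--     for i, c in enumerate(seq):
--         if p2 is not None:
--             codon = p2 + p1 + c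
--             if codon == "ATG":
--                 starts.append(i - 2)
--             elif codon in ("TAA", "TAG", "TGA"):
--                 stops.append(i - 2)
--         p2, p1 = p1, c
--     return starts, stops
-- ===== Notes on version B (the rewrite author's own statement) =====
-- stated objective: alternative
-- what changed: Replaces the index loop that slices seq[i:i+3] at every position with a single character-by-character pass: a sliding-window state machine carries the previous two characters, classifies each completed codon as it forms, and records i-2; there is no indexing, slicing or range bound at all.
import Mathlib
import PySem

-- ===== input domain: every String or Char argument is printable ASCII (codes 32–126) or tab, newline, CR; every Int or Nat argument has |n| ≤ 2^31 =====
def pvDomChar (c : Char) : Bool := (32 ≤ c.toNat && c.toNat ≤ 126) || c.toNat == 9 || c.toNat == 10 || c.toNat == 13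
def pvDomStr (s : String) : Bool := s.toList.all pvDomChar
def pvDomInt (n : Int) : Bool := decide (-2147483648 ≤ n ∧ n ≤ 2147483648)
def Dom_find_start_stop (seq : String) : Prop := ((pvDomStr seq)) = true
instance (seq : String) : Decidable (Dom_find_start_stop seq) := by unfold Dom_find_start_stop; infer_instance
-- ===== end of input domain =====

-- B replaces A's index loop (slice seq[i:i+3] at every i) with a single character-by-character
-- sliding-window state machine carrying the previous two characters; equivalence proved on all inputs.

-- ===== PORT A =====
def find_start_stop (seq : String) : List Int × List Int :=
  (PySem.List.pyRange 0 (PySem.Str.len seq - 2) 1).foldl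
    (fun (acc : List Int × List Int) i =>
      let codon := PySem.Str.slice seq (some i) (some (i + 3))
      let acc := if codon = "ATG" then (acc.1 ++ [i], acc.2) else acc
      let acc := if codon = "TAA" ∨ codon = "TAG" ∨ codon = "TGA" then (acc.1, acc.2 ++ [i]) else acc
      acc)
    ([], [])

-- ===== PORT B =====
-- hand port of Python's enumerate(seq) (exact: pairs each char with its index)
def pyEnumFrom (i : Int) : List Char → List (Int × Char)
  | [] => []
  | c :: r => (i, c) :: pyEnumFrom (i + 1) r

-- one step of B's loop: shift the two-character window, classify the completed codon
def bStep (st : (List Int × List Int) × Option Char × Option Char) (p : Int × Char) :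
    (List Int × List Int) × Option Char × Option Char :=
  match st, p with
  | ((s, t), p2, p1), (i, c) =>
    let acc :=
      match p2, p1 with
      | some a, some b =>
        let codon := String.ofList [a, b, c]
        if codon = "ATG" then (s ++ [i - 2], t)
        else if codon = "TAA" ∨ codon = "TAG" ∨ codon = "TGA" then (s, t ++ [i - 2])
        else (s, t)
      | _, _ => (s, t)
    (acc, p1, some c)

def find_start_stop_alt (seq : String) : List Int × List Int :=
  ((pyEnumFrom 0 seq.toList).foldl bStep (([], []), none, none)).1

-- ===== PRECONDITION & SPEC =====
def Spec_find_start_stop (seq : String) (out : List Int × List Int) : Prop := out = find_start_stop_alt seq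
instance (seq : String) (out : List Int × List Int) : Decidable (Spec_find_start_stop seq out) := by unfold Spec_find_start_stop; infer_instance

-- ===== CLAIM (what is proved, stated in full; the proofs are below) =====
def Claim_equal_find_start_stop : Prop := ∀ (seq : String), Dom_find_start_stop seq → Spec_find_start_stop seq (find_start_stop seq)

-- ===== LEMMAS AND PROOFS =====

-- common reference form: occurrence positions of a window predicate, scanning suffixes
def occ (f : List Char → Bool) : List Char → Int → List Int
  | [], _ => []
  | x :: r, j => (if f (x :: r) then [j] else []) ++ occ f r (j + 1)

def fS (l : List Char) : Bool := ['A', 'T', 'G'].isPrefixOf l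
def fT (l : List Char) : Bool :=
  ['T', 'A', 'A'].isPrefixOf l || ['T', 'A', 'G'].isPrefixOf l || ['T', 'G', 'A'].isPrefixOf l

-- A's loop updates the two accumulator components independently, so the pair fold splits.
theorem foldl_pair_split (p q : Int → Prop) [DecidablePred p] [DecidablePred q]
    (l : List Int) (s t : List Int) :
    l.foldl
      (fun (acc : List Int × List Int) i =>
        let acc := if p i then (acc.1 ++ [i], acc.2) else acc
        let acc := if q i then (acc.1, acc.2 ++ [i]) else acc
        acc) (s, t)
    = (l.foldl (fun a i => if p i then a ++ [i] else a) s,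
       l.foldl (fun a i => if q i then a ++ [i] else a) t) := by
  induction l generalizing s t with
  | nil => rfl
  | cons x xs ih => simp only [List.foldl_cons]; split_ifs <;> simp [ih]

theorem isPrefixOf_false_of_short {pat l : List Char} (h : l.length < pat.length) :
    pat.isPrefixOf l = false := by
  rw [Bool.eq_false_iff]
  intro hp
  rw [List.isPrefixOf_iff_prefix] at hp
  exact absurd hp.length_le (by omega)

-- a filter over range(n) whose test fails on the last two positions equals the filter over range(n-2)
theorem filter_range_shrink (n : Nat) (f : Int → Bool)
    (hf : ∀ i : Int, 0 ≤ i → n ≤ i.toNat + 2 → f i = false) :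
    (PySem.List.pyRange 0 (n : Int) 1).filter f
      = (PySem.List.pyRange 0 ((n : Int) - 2) 1).filter f := by
  by_cases h2 : (n : Int) - 2 ≤ 0
  · rw [PySem.List.pyRange_one_eq_nil h2]
    simp only [List.filter_nil]
    rw [List.filter_eq_nil_iff]
    intro i hi
    rw [PySem.List.mem_pyRange_one] at hi
    simp [hf i hi.1 (by omega)]
  · rw [PySem.List.pyRange_one_append 0 ((n : Int) - 2) (n : Int) (by omega) (by omega),
        List.filter_append]
    have : (PySem.List.pyRange ((n : Int) - 2) (n : Int) 1).filter f = [] := by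
      rw [List.filter_eq_nil_iff]
      intro i hi
      rw [PySem.List.mem_pyRange_one] at hi
      simp [hf i (by omega) (by omega)]
    rw [this, List.append_nil]

-- the slice-equality test of A coincides with a prefix test at every nonnegative offset
theorem slice3_eq_prefix (s : String) (p : String) (pat : List Char)
    (hp : p.toList = pat) (h3 : pat.length = 3) (i : Int) (h0 : 0 ≤ i) :
    decide (PySem.Str.slice s (some i) (some (i + 3)) = p)
      = pat.isPrefixOf (s.toList.drop i.toNat) := by
  have harith : (i + 3).toNat - i.toNat = 3 := by omega
  have hslice : (PySem.Str.slice s (some i) (some (i + 3))).toList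
      = (s.toList.drop i.toNat).take 3 := by
    simp only [PySem.Str.slice, PySem.Chars.slice, String.toList_ofList]
    rw [PySem.List.slice_toNat s.toList h0 (by omega), harith]
  rcases Bool.eq_false_or_eq_true (pat.isPrefixOf (s.toList.drop i.toNat)) with hb | hb
  · rw [hb, decide_eq_true_iff]
    rw [List.isPrefixOf_iff_prefix, List.prefix_iff_eq_take, h3] at hb
    apply String.ext
    rw [hslice, hp, hb]
  · rw [hb, decide_eq_false_iff_not]
    intro he
    rw [Bool.eq_false_iff] at hb
    apply hb
    rw [List.isPrefixOf_iff_prefix, List.prefix_iff_eq_take, h3]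
    rw [← hp, ← he, hslice]

-- the prefix-test filter over range(j, j+len l) is exactly occ
theorem filter_eq_occ (f : List Char → Bool) (l : List Char) :
    ∀ j : Int, 0 ≤ j →
    (PySem.List.pyRange j (j + l.length) 1).filter (fun i => f (l.drop (i - j).toNat)) = occ f l j := by
  induction l with
  | nil =>
    intro j _
    rw [PySem.List.pyRange_one_eq_nil (by simp)]
    rfl
  | cons x r ih =>
    intro j hj
    have hlt : j < j + ((x :: r).length : Int) := by
      have : ((x :: r).length : Int) = (r.length : Int) + 1 := by
        rw [List.length_cons]; push_cast; ring
      omega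
    rw [PySem.List.pyRange_one_cons hlt, List.filter_cons]
    have h0 : (j - j).toNat = 0 := by omega
    simp only [h0, List.drop_zero]
    have htail :
        (PySem.List.pyRange (j + 1) (j + ((x :: r).length : Int)) 1).filter
            (fun i => f ((x :: r).drop (i - j).toNat))
          = (PySem.List.pyRange (j + 1) ((j + 1) + (r.length : Int)) 1).filter
            (fun i => f (r.drop (i - (j + 1)).toNat)) := by
      have harg : (j + ((x :: r).length : Int)) = ((j + 1) + (r.length : Int)) := by
        simp [List.length_cons]; omega
      rw [harg]
      apply List.filter_congr
      intro i hi
      rw [PySem.List.mem_pyRange_one] at hi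
      have : (i - j).toNat = (i - (j + 1)).toNat + 1 := by omega
      rw [this, List.drop_succ_cons]
    rw [htail, ih (j + 1) (by omega)]
    by_cases h : f (x :: r) = true
    · simp [occ, h]
    · simp only [Bool.not_eq_true] at h; simp [occ, h]

-- string-literal codon comparison reduces to list equality
theorem codonEq (a b c x y z : Char) (h : (String.ofList [x, y, z]).toList = [x, y, z]) :
    (String.ofList [a, b, c] = String.ofList [x, y, z]) ↔ [a, b, c] = [x, y, z] := by
  constructor
  · intro he
    have := congrArg String.toList he
    rwa [String.toList_ofList, h] at this
  · intro he; rw [he]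

-- the length-3 prefix test on a ≥3-element list is the codon equality
theorem prefix3 (x y z a b c : Char) (r : List Char) :
    [x, y, z].isPrefixOf (a :: b :: c :: r) = decide ([a, b, c] = [x, y, z]) := by
  simp [List.isPrefixOf, Bool.beq_eq_decide_eq, eq_comm]

-- B's window fold, once the window is full, produces exactly occ of the remaining suffix
theorem bfold (l : List Char) :
    ∀ (i : Int) (a b : Char) (s t : List Int),
    ((pyEnumFrom i l).foldl bStep ((s, t), some a, some b)).1
      = (s ++ occ fS (a :: b :: l) (i - 2), t ++ occ fT (a :: b :: l) (i - 2)) := by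
  induction l with
  | nil =>
    intro i a b s t
    simp [pyEnumFrom, occ, fS, fT, List.isPrefixOf]
  | cons c r ih =>
    intro i a b s t
    simp only [pyEnumFrom, List.foldl_cons, bStep]
    have hS : fS (a :: b :: c :: r) = decide ([a, b, c] = ['A', 'T', 'G']) := by
      simp only [fS]; exact prefix3 _ _ _ _ _ _ _
    have hT : fT (a :: b :: c :: r)
        = (decide ([a, b, c] = ['T', 'A', 'A']) || decide ([a, b, c] = ['T', 'A', 'G'])
           || decide ([a, b, c] = ['T', 'G', 'A'])) := by
      simp only [fT]; rw [prefix3, prefix3, prefix3]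
    have hocc : ∀ f : List Char → Bool, occ f (a :: b :: c :: r) (i - 2)
        = (if f (a :: b :: c :: r) then [i - 2] else []) ++ occ f (b :: c :: r) (i - 1) := by
      intro f; simp only [occ]; ring_nf
    by_cases h1 : [a, b, c] = ['A', 'T', 'G']
    · rw [if_pos ((codonEq a b c 'A' 'T' 'G' rfl).mpr h1)]
      rw [ih (i + 1) b c, hocc fS, hocc fT, hS, hT]
      have hi2 : i + 1 - 2 = i - 1 := by ring
      have hne1 : ¬([a, b, c] = ['T', 'A', 'A']) := by rw [h1]; decide
      have hne2 : ¬([a, b, c] = ['T', 'A', 'G']) := by rw [h1]; decide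
      have hne3 : ¬([a, b, c] = ['T', 'G', 'A']) := by rw [h1]; decide
      rw [if_pos (decide_eq_true h1), if_neg (by simp [hne1, hne2, hne3])]
      simp [hi2]
    · rw [if_neg (fun he => h1 ((codonEq a b c 'A' 'T' 'G' rfl).mp he))]
      by_cases h2 : [a, b, c] = ['T', 'A', 'A'] ∨ [a, b, c] = ['T', 'A', 'G'] ∨ [a, b, c] = ['T', 'G', 'A']
      · rw [if_pos (by
            rcases h2 with h | h | h
            · exact Or.inl ((codonEq a b c 'T' 'A' 'A' rfl).mpr h)
            · exact Or.inr (Or.inl ((codonEq a b c 'T' 'A' 'G' rfl).mpr h))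
            · exact Or.inr (Or.inr ((codonEq a b c 'T' 'G' 'A' rfl).mpr h)))]
        rw [ih (i + 1) b c, hocc fS, hocc fT, hS, hT]
        have hi2 : i + 1 - 2 = i - 1 := by ring
        have hTtrue : (decide ([a, b, c] = ['T', 'A', 'A']) || decide ([a, b, c] = ['T', 'A', 'G'])
            || decide ([a, b, c] = ['T', 'G', 'A'])) = true := by
          rcases h2 with h | h | h <;> simp [h]
        rw [if_neg (by simp [h1]), if_pos hTtrue]
        simp [hi2]
      · rw [if_neg (by
            intro he
            apply h2
            rcases he with h | h | h
            · exact Or.inl ((codonEq a b c 'T' 'A' 'A' rfl).mp h)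
            · exact Or.inr (Or.inl ((codonEq a b c 'T' 'A' 'G' rfl).mp h))
            · exact Or.inr (Or.inr ((codonEq a b c 'T' 'G' 'A' rfl).mp h)))]
        rw [ih (i + 1) b c, hocc fS, hocc fT, hS, hT]
        rw [not_or, not_or] at h2
        have hi2 : i + 1 - 2 = i - 1 := by ring
        rw [if_neg (by simp [h1]), if_neg (by simp [h2.1, h2.2.1, h2.2.2])]
        simp [hi2]

-- B equals the reference occ form
theorem alt_eq_occ (seq : String) :
    find_start_stop_alt seq = (occ fS seq.toList 0, occ fT seq.toList 0) := by
  unfold find_start_stop_alt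
  match h : seq.toList with
  | [] => simp [pyEnumFrom, occ]
  | [c] => simp [pyEnumFrom, bStep, occ, fS, fT, List.isPrefixOf]
  | c1 :: c2 :: r =>
    simp only [pyEnumFrom, List.foldl_cons, bStep]
    rw [bfold r (0 + 1 + 1) c1 c2 [] []]
    norm_num

-- A equals the reference occ form
theorem a_eq_occ (seq : String) :
    find_start_stop seq = (occ fS seq.toList 0, occ fT seq.toList 0) := by
  unfold find_start_stop
  rw [foldl_pair_split]
  rw [PySem.List.foldl_append_ite_eq_filter, PySem.List.foldl_append_ite_eq_filter]
  simp only [List.nil_append, PySem.Str.len_eq]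
  have hshort : ∀ (i : Int) (pat : List Char), 0 ≤ i → pat.length = 3 →
      seq.toList.length ≤ i.toNat + 2 → pat.isPrefixOf (seq.toList.drop i.toNat) = false := by
    intro i pat h0 h3 hlen
    apply isPrefixOf_false_of_short
    rw [List.length_drop, h3]
    omega
  have hlen : ((seq.toList.length : Int)) = ((seq.toList.length : Nat) : Int) := rfl
  simp only [Prod.mk.injEq]
  constructor
  · rw [hlen, ← filter_range_shrink seq.toList.length _
        (fun i h0 hl => by
          have := slice3_eq_prefix seq "ATG" ['A', 'T', 'G'] rfl rfl i h0
          rw [this, hshort i ['A', 'T', 'G'] h0 rfl hl])]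
    rw [← filter_eq_occ fS seq.toList 0 le_rfl]
    simp only [zero_add]
    apply List.filter_congr
    intro i hi
    rw [PySem.List.mem_pyRange_one] at hi
    rw [slice3_eq_prefix seq "ATG" ['A', 'T', 'G'] rfl rfl i hi.1]
    simp [fS]
  · rw [hlen, ← filter_range_shrink seq.toList.length _
        (fun i h0 hl => by
          rw [Bool.decide_or, Bool.decide_or,
            slice3_eq_prefix seq "TAA" ['T', 'A', 'A'] rfl rfl i h0,
            slice3_eq_prefix seq "TAG" ['T', 'A', 'G'] rfl rfl i h0,
            slice3_eq_prefix seq "TGA" ['T', 'G', 'A'] rfl rfl i h0,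
            hshort i ['T', 'A', 'A'] h0 rfl hl, hshort i ['T', 'A', 'G'] h0 rfl hl,
            hshort i ['T', 'G', 'A'] h0 rfl hl]
          rfl)]
    rw [← filter_eq_occ fT seq.toList 0 le_rfl]
    simp only [zero_add]
    apply List.filter_congr
    intro i hi
    rw [PySem.List.mem_pyRange_one] at hi
    rw [Bool.decide_or, Bool.decide_or,
      slice3_eq_prefix seq "TAA" ['T', 'A', 'A'] rfl rfl i hi.1,
      slice3_eq_prefix seq "TAG" ['T', 'A', 'G'] rfl rfl i hi.1,
      slice3_eq_prefix seq "TGA" ['T', 'G', 'A'] rfl rfl i hi.1]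
    simp [fT, Bool.or_assoc]

-- ===== VERDICT (by name: the statement is the Claim_ definition above) =====
theorem find_start_stop_spec : Claim_equal_find_start_stop := by
  intro seq _
  unfold Spec_find_start_stop
  rw [a_eq_occ, alt_eq_occ]
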